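-- pv_equiv track=rewrite | github.com/WallabyJones1/Gboy-Desktop-Companion- | apps/godot-game/tools/generate_gboy_sprites.py | partial_text
-- ===== SOURCE A (Python) =====
-- def partial_text(text: str, reveal_count: int) -> str:
--     shown = 0
--     result = []
--     for char in text:
--         if char == " ":
--             result.append(" ")
--             continue
--         if shown >= reveal_count:
--             break
--         result.append(char)
--         shown += 1
--     return "".join(result)
-- ===== SOURCE B (Python) =====
-- def partial_text(text: str, reveal_count: int) -> str:
--     positions = [i for i, c in enumerate(text) if c != ' ']
--     k = max(reveal_count, 0)
--     if k >= len(positions):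
--         return text
--     return text[:positions[k]]
-- ===== Notes on version B (the rewrite author's own statement) =====
-- stated objective: alternative
-- what changed: Replaces A's incremental branching-append loop with per-character shown counter by building the index list of all non-space positions once and returning a single slice up to the position of the (k+1)-th non-space character.
import Mathlib
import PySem

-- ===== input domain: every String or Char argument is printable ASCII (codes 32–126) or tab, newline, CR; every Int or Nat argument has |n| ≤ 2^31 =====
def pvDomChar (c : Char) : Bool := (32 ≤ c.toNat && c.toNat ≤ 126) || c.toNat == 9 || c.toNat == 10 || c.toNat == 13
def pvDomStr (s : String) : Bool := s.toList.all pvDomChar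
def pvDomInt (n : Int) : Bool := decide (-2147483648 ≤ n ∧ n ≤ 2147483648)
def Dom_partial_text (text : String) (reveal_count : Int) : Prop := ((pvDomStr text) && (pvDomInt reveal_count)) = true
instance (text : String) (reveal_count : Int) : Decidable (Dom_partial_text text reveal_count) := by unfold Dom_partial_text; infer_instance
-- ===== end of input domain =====

-- B replaces A's incremental branching-append loop by building the index list of
-- non-space positions once and returning a single slice (objective: alternative decomposition).

-- ===== PORT A =====
-- the for-loop of A: state = (shown, result); 'break' = stop and return accumulated suffix []
def pvGoA (reveal_count : Int) : List Char → Int → List Char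
  | [], _ => []
  | c :: rest, shown =>
    if c = ' ' then ' ' :: pvGoA reveal_count rest shown
    else if reveal_count ≤ shown then []
    else c :: pvGoA reveal_count rest (shown + 1)

def partial_text (text : String) (reveal_count : Int) : String :=
  String.ofList (pvGoA reveal_count text.toList 0)

-- ===== PORT B =====
def partial_text_alt (text : String) (reveal_count : Int) : String :=
  let positions : List Int :=
    ((PySem.List.enumerate text.toList 0).filter (fun p => p.2 ≠ ' ')).map Prod.fst
  let k : Int := max reveal_count 0
  if (positions.length : Int) ≤ k then text
  else
    -- positions[k] : the guard guarantees 0 ≤ k < len positions, so pyGetD is exact here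
    PySem.Str.slice text none (some (PySem.List.pyGetD positions k 0))

-- ===== PRECONDITION & SPEC =====
def Spec_partial_text (text : String) (reveal_count : Int) (out : String) : Prop := out = partial_text_alt text reveal_count
instance (text : String) (reveal_count : Int) (out : String) : Decidable (Spec_partial_text text reveal_count out) := by unfold Spec_partial_text; infer_instance

-- ===== CLAIM (what is proved, stated in full; the proofs are below) =====
def Claim_equal_partial_text : Prop := ∀ (text : String) (reveal_count : Int), Dom_partial_text text reveal_count → Spec_partial_text text reveal_count (partial_text text reveal_count)

-- ===== LEMMAS AND PROOFS =====

-- Nat-valued positions of the non-space characters, structurally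
def pvPosN : List Char → List Nat
  | [] => []
  | c :: rest => if c = ' ' then (pvPosN rest).map (· + 1) else 0 :: (pvPosN rest).map (· + 1)

-- A's loop with the remaining budget as a Nat
def pvCutN : List Char → Nat → List Char
  | [], _ => []
  | c :: rest, t =>
    if c = ' ' then ' ' :: pvCutN rest t
    else if t = 0 then [] else c :: pvCutN rest (t - 1)

theorem pvGoA_eq_cutN (r : Int) (l : List Char) (shown : Int) :
    pvGoA r l shown = pvCutN l (r - shown).toNat := by
  induction l generalizing shown with
  | nil => simp [pvGoA, pvCutN]
  | cons c rest ih =>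
    simp only [pvGoA, pvCutN]
    by_cases hc : c = ' '
    · simp [hc, ih]
    · simp only [hc]
      by_cases hr : r ≤ shown
      · have h0 : (r - shown).toNat = 0 := by omega
        simp [hr, h0]
      · have h0 : (r - shown).toNat ≠ 0 := by omega
        have h1 : (r - (shown + 1)).toNat = (r - shown).toNat - 1 := by omega
        simp [hr, h0, h1, ih]

theorem pvCutN_eq_take (l : List Char) (k : Nat) :
    pvCutN l k = if (pvPosN l).length ≤ k then l else l.take ((pvPosN l).getD k 0) := by
  induction l generalizing k with
  | nil => simp [pvCutN, pvPosN]
  | cons c rest ih =>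
    by_cases hc : c = ' '
    · simp only [pvCutN, pvPosN, if_pos hc, List.length_map]
      by_cases hk : (pvPosN rest).length ≤ k
      · simp [hk, ih, hc]
      · have hlt : k < (pvPosN rest).length := by omega
        simp [hk, ih, hc, List.getD_eq_getElem?_getD, List.getElem?_eq_getElem hlt,
          List.take_succ_cons]
    · simp only [pvCutN, pvPosN, if_neg hc, List.length_cons, List.length_map]
      cases k with
      | zero => simp
      | succ k' =>
        by_cases hk : (pvPosN rest).length ≤ k'
        · simp [Nat.succ_le_succ hk, hk, ih]
        · have hlt : k' < (pvPosN rest).length := by omega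
          have hnle : ¬ (pvPosN rest).length + 1 ≤ k' + 1 := by omega
          simp [hnle, ih, hk, List.getD_eq_getElem?_getD, List.getElem?_eq_getElem hlt,
            List.take_succ_cons]

theorem pvPos_int_eq (l : List Char) (s : Nat) :
    ((PySem.List.enumerate l (s : Int)).filter (fun p => p.2 ≠ ' ')).map Prod.fst
      = (pvPosN l).map (fun n => ((n + s : Nat) : Int)) := by
  induction l generalizing s with
  | nil => simp [PySem.List.enumerate_nil, pvPosN]
  | cons c rest ih =>
    have h1 : ((s : Int) + 1) = ((s + 1 : Nat) : Int) := by push_cast; ring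
    rw [PySem.List.enumerate_cons, h1]
    by_cases hc : c = ' '
    · simp only [pvPosN, if_pos hc]
      rw [List.filter_cons_of_neg (by simp [hc])]
      rw [ih, List.map_map]
      apply List.map_congr_left
      intro m _
      simp only [Function.comp_apply]
      push_cast; ring
    · simp only [pvPosN, if_neg hc]
      rw [List.filter_cons_of_pos (by simp [hc])]
      simp only [List.map_cons]
      rw [ih]
      simp only [List.map_map]
      congr 1
      · simp
      · apply List.map_congr_left
        intro m _
        simp only [Function.comp_apply]
        push_cast; ring

-- ===== VERDICT (by name: the statement is the Claim_ definition above) =====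
theorem partial_text_spec : Claim_equal_partial_text := by
  intro text n _
  unfold Spec_partial_text partial_text partial_text_alt
  set l := text.toList with hl
  have hpos : ((PySem.List.enumerate l 0).filter (fun p => p.2 ≠ ' ')).map Prod.fst
      = (pvPosN l).map (fun m => ((m : Nat) : Int)) := by
    have h := pvPos_int_eq l 0
    simpa using h
  have hA : pvGoA n l 0 = pvCutN l n.toNat := by
    simpa using pvGoA_eq_cutN n l 0
  have hk : max n 0 = ((n.toNat : Nat) : Int) := by
    rcases le_total n 0 with h | h
    · rw [max_eq_right h]; omega
    · rw [max_eq_left h]; omega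
  simp only [hpos, hA, hk, List.length_map, pvCutN_eq_take]
  by_cases hlen : (pvPosN l).length ≤ n.toNat
  · have h1 : (((pvPosN l).length : Nat) : Int) ≤ ((n.toNat : Nat) : Int) := by
      exact_mod_cast hlen
    rw [if_pos h1, if_pos hlen, hl, String.ofList_toList]
  · have hlt : n.toNat < (pvPosN l).length := by omega
    have h1 : ¬ (((pvPosN l).length : Nat) : Int) ≤ ((n.toNat : Nat) : Int) := by
      exact_mod_cast hlen
    rw [if_neg h1, if_neg hlen]
    have hget : PySem.List.pyGetD ((pvPosN l).map (fun m => ((m : Nat) : Int))) ((n.toNat : Nat) : Int) 0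
        = (((pvPosN l).getD n.toNat 0 : Nat) : Int) := by
      rw [PySem.List.pyGetD_natCast]
      simp [List.getD_eq_getElem?_getD, List.getElem?_eq_getElem hlt]
    rw [hget]
    have hslice : (PySem.Str.slice text none (some (((pvPosN l).getD n.toNat 0 : Nat) : Int))).toList
        = l.take ((pvPosN l).getD n.toNat 0) := by
      rw [PySem.Str.toList_slice, ← hl, PySem.Chars.slice_eq_listSlice, PySem.List.slice_to_natCast]
    calc String.ofList (List.take ((pvPosN l).getD n.toNat 0) l)
        = String.ofList ((PySem.Str.slice text none (some (((pvPosN l).getD n.toNat 0 : Nat) : Int))).toList) := by rw [hslice]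
      _ = PySem.Str.slice text none (some (((pvPosN l).getD n.toNat 0 : Nat) : Int)) := String.ofList_toList
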